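-- pv_equiv track=rewrite | github.com/kaiogre10/perfectocr | PerfectOCR/core/spatial_analysis/gradient_calculator.py | _merge_regions_optimized
-- ===== SOURCE A (Python) =====
-- from typing import Optional, List, Tuple, Dict, Any, Union
--
-- def _merge_regions_optimized(artificial_rows: List[int], fusion_radius_px: int, w: int) -> List[List[int]]:
--     """
--     Función auxiliar para fusionar regiones de líneas artificiales.
--     """
--     if not artificial_rows:
--         return []
--
--     regions = []
--     current_group_start = artificial_rows[0]
--     current_group_end = artificial_rows[0]
--
--     for i in range(1, len(artificial_rows)):
--         current_y = artificial_rows[i]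
--
--         if current_y - current_group_end <= fusion_radius_px:
--             current_group_end = current_y
--         else:
--             regions.append([0, current_group_start, w - 1, current_group_end])
--             current_group_start = current_y
--             current_group_end = current_y
--
--     regions.append([0, current_group_start, w - 1, current_group_end])
--     return regions
-- ===== SOURCE B (Python) =====
-- from typing import List
--
-- def _merge_regions_optimized(artificial_rows: List[int], fusion_radius_px: int, w: int) -> List[List[int]]:
--     # Staged index-based decomposition: (1) find the break indices where the
--     # gap between consecutive rows exceeds the radius, (2) form the boundary
--     # list [0] + breaks + [n], (3) emit one region per adjacent boundary pair.
--     if not artificial_rows: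
--         return []
--     n = len(artificial_rows)
--     breaks = [i for i in range(1, n)
--               if artificial_rows[i] - artificial_rows[i - 1] > fusion_radius_px]
--     bounds = [0] + breaks + [n]
--     return [[0, artificial_rows[b], w - 1, artificial_rows[e - 1]]
--             for b, e in zip(bounds, bounds[1:])]
-- ===== Notes on version B (the rewrite author's own statement) =====
-- stated objective: alternative
-- what changed: Replaces A's single accumulator merge loop by a staged index-based decomposition: a filter over index range(1,n) collects break points where the consecutive gap exceeds the radius, a boundary list [0]+breaks+[n] is formed, and a comprehension over adjacent boundary pairs emits [0, rows[b], w-1, rows[e-1]] per run; no running group state exists.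
import Mathlib
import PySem

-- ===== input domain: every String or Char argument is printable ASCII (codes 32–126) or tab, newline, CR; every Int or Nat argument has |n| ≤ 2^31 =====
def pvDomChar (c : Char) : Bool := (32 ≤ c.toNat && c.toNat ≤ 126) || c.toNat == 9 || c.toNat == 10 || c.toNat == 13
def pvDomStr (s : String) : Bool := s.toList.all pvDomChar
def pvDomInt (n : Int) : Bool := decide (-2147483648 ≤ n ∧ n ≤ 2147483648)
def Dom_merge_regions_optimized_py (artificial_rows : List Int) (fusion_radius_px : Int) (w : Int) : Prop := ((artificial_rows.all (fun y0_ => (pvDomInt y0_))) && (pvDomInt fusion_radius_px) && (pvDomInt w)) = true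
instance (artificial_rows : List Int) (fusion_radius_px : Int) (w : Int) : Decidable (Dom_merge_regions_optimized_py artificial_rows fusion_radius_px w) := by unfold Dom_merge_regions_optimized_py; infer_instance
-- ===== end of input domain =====

-- B replaces A's accumulator merge loop by a staged index-based decomposition
-- (filter break indices, build the boundary list [0]+breaks+[n], map adjacent
-- boundary pairs to regions); same O(n) cost, objective: alternative.

-- ===== PORT A =====
-- literal transliteration of A: loop over the tail with state (regions, group_start, group_end)
def merge_regions_optimized_py (artificial_rows : List Int) (fusion_radius_px : Int) (w : Int) : List (List Int) :=
  match artificial_rows with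
  | [] => []
  | a :: rest =>
    let st := rest.foldl (fun (s : List (List Int) × Int × Int) current_y =>
      if current_y - s.2.2 ≤ fusion_radius_px then (s.1, s.2.1, current_y)
      else (s.1 ++ [[0, s.2.1, w - 1, s.2.2]], current_y, current_y)) ([], a, a)
    st.1 ++ [[0, st.2.1, w - 1, st.2.2]]

-- ===== PORT B =====
-- transliteration of Source B: filter break indices over range(1, n), form the
-- boundary list [0] + breaks + [n], map adjacent boundary pairs to regions.
-- Indexing uses pyGetD (all indices reached are in range, so it is exact).
def merge_regions_optimized_py_alt (artificial_rows : List Int) (fusion_radius_px : Int) (w : Int) : List (List Int) :=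
  match artificial_rows with
  | [] => []
  | _ :: _ =>
    let n : Int := artificial_rows.length
    let breaks := (PySem.List.pyRange 1 n 1).filter (fun i =>
      decide (PySem.List.pyGetD artificial_rows i 0 - PySem.List.pyGetD artificial_rows (i - 1) 0 > fusion_radius_px))
    let bounds := 0 :: (breaks ++ [n])
    (bounds.zip bounds.tail).map (fun be =>
      [0, PySem.List.pyGetD artificial_rows be.1 0, w - 1, PySem.List.pyGetD artificial_rows (be.2 - 1) 0])

-- ===== PRECONDITION & SPEC =====
def Spec_merge_regions_optimized_py (artificial_rows : List Int) (fusion_radius_px : Int) (w : Int) (out : List (List Int)) : Prop := out = merge_regions_optimized_py_alt artificial_rows fusion_radius_px w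
instance (artificial_rows : List Int) (fusion_radius_px : Int) (w : Int) (out : List (List Int)) : Decidable (Spec_merge_regions_optimized_py artificial_rows fusion_radius_px w out) := by unfold Spec_merge_regions_optimized_py; infer_instance

-- ===== CLAIM (what is proved, stated in full; the proofs are below) =====
def Claim_equal_merge_regions_optimized_py : Prop := ∀ (artificial_rows : List Int) (fusion_radius_px : Int) (w : Int), Dom_merge_regions_optimized_py artificial_rows fusion_radius_px w → Spec_merge_regions_optimized_py artificial_rows fusion_radius_px w (merge_regions_optimized_py artificial_rows fusion_radius_px w)

-- ===== LEMMAS AND PROOFS =====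

-- proof-only helpers: an intermediate "runs" formulation bridging A's fold and
-- B's index-based regions
def pvStep (r : Int) : List (List Int) → Int × Int → List (List Int) :=
  fun runs pc => if pc.2 - pc.1 ≤ r then runs.dropLast ++ [runs.getLastD [] ++ [pc.2]] else runs ++ [[pc.2]]

def pvF (w : Int) : List Int → List Int := fun run => [0, run.headD 0, w - 1, run.getLastD 0]

def pvBrks (xs : List Int) (r : Int) : List Int :=
  (PySem.List.pyRange 1 (xs.length : Int) 1).filter (fun i =>
    decide (PySem.List.pyGetD xs i 0 - PySem.List.pyGetD xs (i - 1) 0 > r))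

def pvG (xs : List Int) (w : Int) : Int × Int → List Int :=
  fun be => [0, PySem.List.pyGetD xs be.1 0, w - 1, PySem.List.pyGetD xs (be.2 - 1) 0]

theorem headD_append_of_ne_nil (cur : List Int) (y d : Int) (h : cur ≠ []) :
    (cur ++ [y]).headD d = cur.headD d := by
  cases cur with
  | nil => exact absurd rfl h
  | cons x t => simp

-- A's fold equals the runs formulation (invariant: cur is the nonempty current run, p its last element)
theorem merge_loop_corr (fusion_radius_px w : Int) :
    ∀ (t : List Int) (p : Int) (done : List (List Int)) (cur : List Int),
    cur ≠ [] → cur.getLastD 0 = p →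
    (let st := t.foldl (fun (s : List (List Int) × Int × Int) current_y =>
        if current_y - s.2.2 ≤ fusion_radius_px then (s.1, s.2.1, current_y)
        else (s.1 ++ [[0, s.2.1, w - 1, s.2.2]], current_y, current_y))
        (done.map (pvF w), cur.headD 0, p)
     st.1 ++ [[0, st.2.1, w - 1, st.2.2]])
    = (((p :: t).zip t).foldl (pvStep fusion_radius_px) (done ++ [cur])).map (pvF w) := by
  intro t
  induction t with
  | nil =>
    intro p done cur hne hlast
    rw [List.getLastD_eq_getLast?] at hlast
    simp [List.foldl, pvF, hlast]
  | cons y t' ih =>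
    intro p done cur hne hlast
    simp only [List.zip_cons_cons, List.foldl_cons]
    by_cases hc : y - p ≤ fusion_radius_px
    · have h2 : (done ++ [cur]).getLastD [] = cur := by simp
      have h3 : (cur ++ [y]).headD 0 = cur.headD 0 := headD_append_of_ne_nil cur y 0 hne
      have h4 : (cur ++ [y]).getLastD 0 = y := by simp
      have := ih y done (cur ++ [y]) (by simp) h4
      simp only [h3] at this
      simpa [pvStep, hc, List.dropLast_concat, h2] using this
    · have := ih y (done ++ [cur]) [y] (by simp) (by simp)
      rw [List.getLastD_eq_getLast?] at hlast
      simpa [pvStep, pvF, hc, hlast] using this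

-- consecutive-pairs of a list with one element appended
theorem cp_concat {α : Type} (xs : List α) (y : α) (h : xs ≠ []) :
    (xs ++ [y]).zip ((xs ++ [y]).tail) = xs.zip xs.tail ++ [(xs.getLast h, y)] := by
  induction xs with
  | nil => exact absurd rfl h
  | cons x xt ih =>
    cases xt with
    | nil => simp
    | cons z zt =>
      have := ih (by simp)
      simpa [List.getLast] using congrArg (List.cons (x, z)) this

theorem pyGetD_append_lt (xs : List Int) (y d : Int) (i : Int) (h0 : 0 ≤ i) (h : i < (xs.length : Int)) :
    PySem.List.pyGetD (xs ++ [y]) i d = PySem.List.pyGetD xs i d := by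
  rw [PySem.List.pyGetD_eq_getElem (xs ++ [y]) d h0 (by simp; omega),
      PySem.List.pyGetD_eq_getElem xs d h0 (by omega)]
  exact List.getElem_append_left (by omega)

theorem pyGetD_concat_length (xs : List Int) (y d : Int) :
    PySem.List.pyGetD (xs ++ [y]) (xs.length : Int) d = y := by
  rw [PySem.List.pyGetD_eq_getElem (xs ++ [y]) d (by omega) (by simp)]
  simp

theorem pyGetD_length_pred (xs : List Int) (d : Int) (h : xs ≠ []) :
    PySem.List.pyGetD xs ((xs.length : Int) - 1) d = xs.getLast h := by
  have hl : 0 < xs.length := List.length_pos_iff.mpr h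
  rw [PySem.List.pyGetD_eq_getElem xs d (by omega) (by omega)]
  rw [List.getLast_eq_getElem]
  congr 1
  omega

theorem pyGetD_concat_pred (xs : List Int) (y d : Int) (h : xs ≠ []) :
    PySem.List.pyGetD (xs ++ [y]) ((xs.length : Int) - 1) d = xs.getLast h := by
  have hl : 0 < xs.length := List.length_pos_iff.mpr h
  rw [pyGetD_append_lt xs y d _ (by omega) (by omega)]
  exact pyGetD_length_pred xs d h

theorem mem_pvBrks (xs : List Int) (r i : Int) (h : i ∈ pvBrks xs r) :
    1 ≤ i ∧ i < (xs.length : Int) := by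
  unfold pvBrks at h
  have := List.mem_filter.mp h
  exact PySem.List.mem_pyRange_one.mp this.1

-- appending y to xs keeps every existing break and adds the break at n iff the new gap is large
theorem pvBrks_concat (xs : List Int) (y r : Int) (h : xs ≠ []) :
    pvBrks (xs ++ [y]) r
      = pvBrks xs r ++ (if y - xs.getLast h > r then [(xs.length : Int)] else []) := by
  unfold pvBrks
  have hl : 0 < xs.length := List.length_pos_iff.mpr h
  have hn : ((xs ++ [y]).length : Int) = (xs.length : Int) + 1 := by simp
  rw [hn, PySem.List.pyRange_one_succ_right (by omega), List.filter_append]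
  congr 1
  · apply List.filter_congr
    intro i hi
    have hb := PySem.List.mem_pyRange_one.mp hi
    rw [pyGetD_append_lt xs y 0 i (by omega) (by omega),
        pyGetD_append_lt xs y 0 (i - 1) (by omega) (by omega)]
  · rw [List.filter_singleton]
    simp only [pyGetD_concat_length]
    have : PySem.List.pyGetD (xs ++ [y]) ((xs.length : Int) - 1) 0 = xs.getLast h :=
      pyGetD_concat_pred xs y 0 h
    rw [this]
    by_cases hc : y - xs.getLast h > r <;> simp [hc]

-- the fold over pairs keeps the runs list nonempty with a nonempty last run
theorem pvFold_invariant (r : Int) (ps : List (Int × Int)) :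
    ∀ (init : List (List Int)), init ≠ [] → init.getLastD [] ≠ [] →
    (ps.foldl (pvStep r) init) ≠ [] ∧ (ps.foldl (pvStep r) init).getLastD [] ≠ [] := by
  induction ps with
  | nil => intro init h1 h2; exact ⟨h1, h2⟩
  | cons p pt ih =>
    intro init h1 h2
    simp only [List.foldl_cons]
    unfold pvStep
    by_cases hc : p.2 - p.1 ≤ r
    · exact ih _ (by simp [hc]) (by simp [hc])
    · exact ih _ (by simp [hc]) (by simp [hc])

-- freezing lemma: pvG over pairs drawn from 0 :: breaks ignores the appended element
theorem pvMapG_frozen (xs : List Int) (y r w : Int) (h : xs ≠ []) :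
    ((0 :: pvBrks xs r).zip (pvBrks xs r)).map (pvG (xs ++ [y]) w)
      = ((0 :: pvBrks xs r).zip (pvBrks xs r)).map (pvG xs w) := by
  apply List.map_congr_left
  intro be hbe
  have hmem := List.of_mem_zip hbe
  have hb : be.1 = 0 ∨ be.1 ∈ pvBrks xs r := List.mem_cons.mp hmem.1
  have he := mem_pvBrks xs r be.2 hmem.2
  have hb' : 0 ≤ be.1 ∧ be.1 < (xs.length : Int) := by
    rcases hb with h' | h'
    · constructor
      · omega
      · have := List.length_pos_iff.mpr h; omega
    · have := mem_pvBrks xs r be.1 h'; omega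
  unfold pvG
  rw [pyGetD_append_lt xs y 0 be.1 hb'.1 hb'.2,
      pyGetD_append_lt xs y 0 (be.2 - 1) (by omega) (by omega)]

-- B's port, unfolded to the helper form
theorem alt_eq (xs : List Int) (r w : Int) (h : xs ≠ []) :
    merge_regions_optimized_py_alt xs r w
      = (((0 :: (pvBrks xs r ++ [(xs.length : Int)])).zip (pvBrks xs r ++ [(xs.length : Int)])).map (pvG xs w)) := by
  cases xs with
  | nil => exact absurd rfl h
  | cons a t => rfl

-- main bridge: the runs fold, mapped to regions, equals the boundary-pair regions
theorem runs_eq_bounds (r w : Int) :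
    ∀ (xs : List Int) (h : xs ≠ []),
    ((xs.zip xs.tail).foldl (pvStep r) [[xs.headD 0]]).map (pvF w)
      = ((0 :: (pvBrks xs r ++ [(xs.length : Int)])).zip (pvBrks xs r ++ [(xs.length : Int)])).map (pvG xs w) := by
  intro xs
  induction xs using List.reverseRecOn with
  | nil => intro h; exact absurd rfl h
  | append_singleton xs y ih =>
    intro _
    cases hxs : xs with
    | nil =>
      subst hxs
      simp [pvBrks, pvF, pvG, PySem.List.pyRange_one_eq_nil, PySem.List.pyGetD]
    | cons a t =>
      have hne : xs ≠ [] := by rw [hxs]; simp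
      rw [← hxs]
      have ihx := ih hne
      -- LHS: split the consecutive pairs at the end
      rw [headD_append_of_ne_nil xs y 0 hne, cp_concat xs y hne, List.foldl_append]
      -- RHS: split breaks at the end
      rw [pvBrks_concat xs y r hne]
      have hn1 : ((xs ++ [y]).length : Int) = (xs.length : Int) + 1 := by simp
      rw [hn1]
      have hinv := pvFold_invariant r (xs.zip xs.tail) [[xs.headD 0]] (by simp) (by simp)
      set R := (xs.zip xs.tail).foldl (pvStep r) [[xs.headD 0]] with hR
      -- last boundary of the old bounds
      have hbne : (0 :: pvBrks xs r) ≠ [] := by simp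
      set L := (0 :: pvBrks xs r).getLast hbne with hL
      have hLmem : L ∈ 0 :: pvBrks xs r := List.getLast_mem hbne
      have hLb : 0 ≤ L ∧ L < (xs.length : Int) := by
        rcases List.mem_cons.mp hLmem with h' | h'
        · have := List.length_pos_iff.mpr hne
          constructor
          · omega
          · omega
        · have := mem_pvBrks xs r L h'; omega
      -- old bounds pairs, split at the end
      have hcpold : ((0 :: (pvBrks xs r ++ [(xs.length : Int)])).zip (pvBrks xs r ++ [(xs.length : Int)]))
          = (0 :: pvBrks xs r).zip (pvBrks xs r) ++ [(L, (xs.length : Int))] := by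
        have := cp_concat (0 :: pvBrks xs r) ((xs.length : Int)) hbne
        simpa using this
      by_cases hc : y - xs.getLast hne ≤ r
      · -- merge case: no new break
        have hc' : ¬ (y - xs.getLast hne > r) := by omega
        rw [if_neg hc', List.append_nil]
        -- RHS pairs
        have hcpnew : ((0 :: (pvBrks xs r ++ [(xs.length : Int) + 1])).zip (pvBrks xs r ++ [(xs.length : Int) + 1]))
            = (0 :: pvBrks xs r).zip (pvBrks xs r) ++ [(L, (xs.length : Int) + 1)] := by
          have := cp_concat (0 :: pvBrks xs r) ((xs.length : Int) + 1) hbne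
          simpa using this
        rw [hcpnew, List.map_append, pvMapG_frozen xs y r w hne]
        -- IH, split
        rw [hcpold, List.map_append] at ihx
        -- LHS step
        have hstep : pvStep r R (xs.getLast hne, y) = R.dropLast ++ [R.getLastD [] ++ [y]] := by
          unfold pvStep; simp [hc]
        simp only [List.foldl_cons, List.foldl_nil]
        rw [hstep, List.map_append]
        have hdrop : (R.dropLast).map (pvF w) = ((0 :: pvBrks xs r).zip (pvBrks xs r)).map (pvG xs w) := by
          have := congrArg List.dropLast ihx
          simpa [← List.map_dropLast, List.dropLast_concat] using this
        have hlastF : pvF w (R.getLastD []) = pvG xs w (L, (xs.length : Int)) := by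
          have h1 := congrArg List.getLast? ihx
          rw [List.getLast?_map] at h1
          have h2 : R.getLast? = some (R.getLastD []) := by
            rw [List.getLastD_eq_getLast?]
            cases hq : R.getLast? with
            | none => exact absurd (List.getLast?_eq_none_iff.mp hq) hinv.1
            | some v => rfl
          rw [h2] at h1
          simpa using h1
        have hheads : (R.getLastD []).headD 0 = PySem.List.pyGetD xs L 0 := by
          have h' := hlastF
          unfold pvF pvG at h'
          simp only [List.cons.injEq] at h'
          exact h'.2.1
        rw [hdrop]
        congr 1
        unfold pvF pvG
        simp only [List.map_cons, List.map_nil]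
        rw [headD_append_of_ne_nil _ y 0 hinv.2, hheads]
        have hgl : PySem.List.pyGetD (xs ++ [y]) ((xs.length : Int) + 1 - 1) 0 = y := by
          have : (xs.length : Int) + 1 - 1 = (xs.length : Int) := by omega
          rw [this]; exact pyGetD_concat_length xs y 0
        rw [pyGetD_append_lt xs y 0 L hLb.1 hLb.2, hgl]
        simp
      · -- break case: a new break at n
        have hc' : y - xs.getLast hne > r := by omega
        rw [if_pos hc']
        have hbne2 : (0 :: (pvBrks xs r ++ [(xs.length : Int)])) ≠ [] := by simp
        have hcpnew : ((0 :: ((pvBrks xs r ++ [(xs.length : Int)]) ++ [(xs.length : Int) + 1])).zip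
              ((pvBrks xs r ++ [(xs.length : Int)]) ++ [(xs.length : Int) + 1]))
            = (0 :: (pvBrks xs r ++ [(xs.length : Int)])).zip (pvBrks xs r ++ [(xs.length : Int)])
              ++ [((xs.length : Int), (xs.length : Int) + 1)] := by
          have := cp_concat (0 :: (pvBrks xs r ++ [(xs.length : Int)])) ((xs.length : Int) + 1) hbne2
          simpa using this
        rw [show pvBrks xs r ++ [(xs.length : Int)] ++ [(xs.length : Int) + 1]
              = (pvBrks xs r ++ [(xs.length : Int)]) ++ [(xs.length : Int) + 1] from by simp] at *
        rw [hcpnew, List.map_append]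
        -- the frozen part equals the IH's RHS
        have hfroz : ((0 :: (pvBrks xs r ++ [(xs.length : Int)])).zip (pvBrks xs r ++ [(xs.length : Int)])).map (pvG (xs ++ [y]) w)
            = ((0 :: (pvBrks xs r ++ [(xs.length : Int)])).zip (pvBrks xs r ++ [(xs.length : Int)])).map (pvG xs w) := by
          rw [hcpold, List.map_append, List.map_append, pvMapG_frozen xs y r w hne]
          congr 1
          unfold pvG
          simp only [List.map_cons, List.map_nil]
          rw [pyGetD_append_lt xs y 0 L hLb.1 hLb.2,
              pyGetD_append_lt xs y 0 ((xs.length : Int) - 1) (by have := List.length_pos_iff.mpr hne; omega) (by omega)]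
        rw [hfroz, ← ihx]
        have hstep : pvStep r R (xs.getLast hne, y) = R ++ [[y]] := by
          unfold pvStep; simp; omega
        simp only [List.foldl_cons, List.foldl_nil]
        rw [hstep, List.map_append]
        congr 1
        unfold pvF pvG
        have : (xs.length : Int) + 1 - 1 = (xs.length : Int) := by omega
        simp only [List.map_cons, List.map_nil, this, pyGetD_concat_length]
        simp

-- ===== VERDICT (by name: the statement is the Claim_ definition above) =====
theorem merge_regions_optimized_py_spec : Claim_equal_merge_regions_optimized_py := by
  intro artificial_rows fusion_radius_px w _
  unfold Spec_merge_regions_optimized_py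
  cases hxs : artificial_rows with
  | nil => rfl
  | cons a rest =>
    have hA := merge_loop_corr fusion_radius_px w rest a [] [a] (by simp) (by simp)
    have hne : (a :: rest) ≠ [] := by simp
    have hB := runs_eq_bounds fusion_radius_px w (a :: rest) hne
    rw [alt_eq (a :: rest) fusion_radius_px w hne]
    have hhead : (a :: rest).headD 0 = a := rfl
    rw [hhead] at hB
    have : (a :: rest).zip (a :: rest).tail = (a :: rest).zip rest := rfl
    rw [this] at hB
    calc merge_regions_optimized_py (a :: rest) fusion_radius_px w
        = (((a :: rest).zip rest).foldl (pvStep fusion_radius_px) [[a]]).map (pvF w) := by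
          simpa [merge_regions_optimized_py, pvF] using hA
      _ = _ := hB
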